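-- pv_equiv track=rewrite | github.com/AlbertoLlera/EjerciciosPython | ut4StringsArrays/tuplaAnalizarNumeros.py | analizar_numeros
-- ===== SOURCE A (Python) =====
-- def analizar_numeros(numeros):
--     pares = 0
--     impares = 0
--     total = 0
--
--     for numero in numeros:
--         if numero % 2 == 0:
--             pares += 1
--         else:
--             impares += 1
--
--         total += 1
--
--     return total, pares, impares
-- ===== SOURCE B (Python) =====
-- def analizar_numeros(numeros):
--     # Divide and conquer: split the list in half, analyse each half
--     # recursively, and add the three counts of the halves.
--     if len(numeros) == 0:
--         return 0, 0, 0
--     if len(numeros) == 1: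
--         e = 1 if numeros[0] % 2 == 0 else 0
--         return 1, e, 1 - e
--     mid = len(numeros) // 2
--     t1, p1, i1 = analizar_numeros(numeros[:mid])
--     t2, p2, i2 = analizar_numeros(numeros[mid:])
--     return t1 + t2, p1 + p2, i1 + i2
-- ===== Notes on version B (the rewrite author's own statement) =====
-- stated objective: alternative
-- what changed: Replaced the single three-counter loop by a divide-and-conquer recursion that splits the list in half, analyses each half, and adds the per-half (total, pares, impares) triples.
import Mathlib
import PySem

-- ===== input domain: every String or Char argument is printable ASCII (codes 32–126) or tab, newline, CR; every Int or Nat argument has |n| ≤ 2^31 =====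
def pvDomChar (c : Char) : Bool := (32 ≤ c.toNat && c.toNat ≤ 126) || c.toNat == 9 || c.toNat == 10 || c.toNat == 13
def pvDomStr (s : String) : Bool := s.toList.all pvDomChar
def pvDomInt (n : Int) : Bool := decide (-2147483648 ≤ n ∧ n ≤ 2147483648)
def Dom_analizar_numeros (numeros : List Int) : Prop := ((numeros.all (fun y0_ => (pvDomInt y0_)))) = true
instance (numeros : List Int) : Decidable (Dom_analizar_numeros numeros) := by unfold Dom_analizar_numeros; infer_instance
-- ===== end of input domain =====

-- B replaces A's single three-counter loop by a divide-and-conquer recursion on list halves (objective: alternative).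
-- ===== PORT A =====
-- literal port of A: one fold over the list carrying (pares, impares, total)
def analizar_numeros (numeros : List Int) : Int × Int × Int :=
  let st := numeros.foldl
    (fun (st : Int × Int × Int) numero =>
      let (pares, impares, total) := st
      let (pares, impares) :=
        if PySem.Int.mod numero 2 = 0 then (pares + 1, impares) else (pares, impares + 1)
      (pares, impares, total + 1))
    (0, 0, 0)
  (st.2.2, st.1, st.2.1)

-- ===== PORT B =====
-- port of B: split in half (numeros[:mid] / numeros[mid:] via PySem.List.slice), recurse, add the triples
def analizar_numeros_alt (numeros : List Int) : Int × Int × Int :=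
  if numeros.length = 0 then (0, 0, 0)
  else if numeros.length = 1 then
    let e : Int := if PySem.Int.mod (PySem.List.pyGetD numeros 0 0) 2 = 0 then 1 else 0
    (1, e, 1 - e)
  else
    let mid := numeros.length / 2
    let r1 := analizar_numeros_alt (PySem.List.slice numeros none (some (mid : Int)))
    let r2 := analizar_numeros_alt (PySem.List.slice numeros (some (mid : Int)) none)
    (r1.1 + r2.1, r1.2.1 + r2.2.1, r1.2.2 + r2.2.2)
termination_by numeros.length
decreasing_by
  · simp only [PySem.List.slice_to_natCast, List.length_take]; omega
  · simp only [PySem.List.slice_from_natCast, List.length_drop]; omega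

-- ===== PRECONDITION & SPEC =====
def Spec_analizar_numeros (numeros : List Int) (out : Int × Int × Int) : Prop := out = analizar_numeros_alt numeros
instance (numeros : List Int) (out : Int × Int × Int) : Decidable (Spec_analizar_numeros numeros out) := by unfold Spec_analizar_numeros; infer_instance

-- ===== CLAIM (what is proved, stated in full; the proofs are below) =====
def Claim_equal_analizar_numeros : Prop := ∀ (numeros : List Int), Dom_analizar_numeros numeros → Spec_analizar_numeros numeros (analizar_numeros numeros)

-- ===== LEMMAS AND PROOFS =====

-- number of even entries, as an Int
def pvEvens (xs : List Int) : Int :=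
  ((xs.filter (fun n => PySem.Int.mod n 2 = 0)).length : Int)

theorem pvEvens_append (xs ys : List Int) : pvEvens (xs ++ ys) = pvEvens xs + pvEvens ys := by
  simp [pvEvens]

-- A's loop computes (evens + p, odds + i, length + t) from any start state
theorem analizar_numeros_loop (numeros : List Int) (p i t : Int) :
    numeros.foldl
      (fun (st : Int × Int × Int) numero =>
        let (pares, impares, total) := st
        let (pares, impares) :=
          if PySem.Int.mod numero 2 = 0 then (pares + 1, impares) else (pares, impares + 1)
        (pares, impares, total + 1))
      (p, i, t)
    = (p + pvEvens numeros,
       i + ((numeros.length : Int) - pvEvens numeros),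
       t + numeros.length) := by
  induction numeros generalizing p i t with
  | nil => simp [pvEvens]
  | cons x xs ih =>
    by_cases h : PySem.Int.mod x 2 = 0 <;>
      simp only [List.foldl_cons, pvEvens, List.filter_cons, h, decide_true,
        decide_false, ite_true, ite_false, List.length_cons, ih] <;>
      refine Prod.ext ?_ (Prod.ext ?_ ?_) <;> push_cast <;> ring

-- B's divide-and-conquer computes (length, evens, length − evens)
theorem alt_eq (numeros : List Int) :
    analizar_numeros_alt numeros
      = ((numeros.length : Int), pvEvens numeros, (numeros.length : Int) - pvEvens numeros) := by
  induction numeros using analizar_numeros_alt.induct with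
  | case1 xs h0 =>
    rw [List.length_eq_zero_iff] at h0
    subst h0
    simp [analizar_numeros_alt, pvEvens]
  | case2 xs h0 h1 =>
    obtain ⟨a, rfl⟩ := List.length_eq_one_iff.mp h1
    simp [analizar_numeros_alt, pvEvens, List.filter_cons, PySem.List.pyGetD_zero_cons]
    split <;> simp
  | case3 xs h0 h1 mid ih1 ih2 =>
    rw [analizar_numeros_alt]
    simp only [h0, h1, if_false]
    rw [ih1, ih2]
    have hsplit : xs = PySem.List.slice xs none (some ((mid : Nat) : Int))
        ++ PySem.List.slice xs (some ((mid : Nat) : Int)) none := by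
      simp [PySem.List.slice_to_natCast, PySem.List.slice_from_natCast]
    have hL : ((xs.length : Int))
        = ((PySem.List.slice xs none (some ((mid : Nat) : Int))).length : Int)
          + ((PySem.List.slice xs (some ((mid : Nat) : Int)) none).length : Int) := by
      conv_lhs => rw [hsplit]
      push_cast [List.length_append]; ring
    have hE : pvEvens xs
        = pvEvens (PySem.List.slice xs none (some ((mid : Nat) : Int)))
          + pvEvens (PySem.List.slice xs (some ((mid : Nat) : Int)) none) := by
      conv_lhs => rw [hsplit]
      exact pvEvens_append _ _
    refine Prod.ext ?_ (Prod.ext ?_ ?_) <;> simp only [hL, hE] <;> push_cast <;> ring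

-- ===== VERDICT (by name: the statement is the Claim_ definition above) =====
theorem analizar_numeros_spec : Claim_equal_analizar_numeros := by
  intro numeros _
  unfold Spec_analizar_numeros
  rw [alt_eq]
  unfold analizar_numeros
  simp only [analizar_numeros_loop]
  refine Prod.ext ?_ (Prod.ext ?_ ?_) <;> push_cast <;> ring
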